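-- pv_equiv track=rewrite | github.com/MalongSuper/Python-Programming---Mathematics | SubnettingNetwork.py | get_required_hosts
-- ===== SOURCE A (Python) =====
-- def get_required_hosts(hosts):
--     # Minimum Hosts required: [2^2, 2^3, 2^4, ...]
--     available_hosts = [4, 8, 16, 32, 64, 128, 256, 512, 1024]
--     required_hosts = []
--     # Get the required hosts
--     for host in hosts.values():
--         for available in available_hosts:
--             # Break the loop if the available_hosts greater than
--             # the hosts is found
--             if available > host:
--                 required_hosts.append(available)
--                 break
--     return required_hosts
-- ===== SOURCE B (Python) =====
-- def get_required_hosts(hosts):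
--     required_hosts = []
--     for host in hosts.values():
--         if host < 1024:
--             required_hosts.append(4 if host < 4 else 1 << host.bit_length())
--     return required_hosts
-- ===== Notes on version B (the rewrite author's own statement) =====
-- stated objective: simpler
-- what changed: Replaces the inner linear scan over the power-of-two list with a closed-form bit-length computation (smallest power of two strictly greater than host, clamped to at least 4), skipping hosts >= 1024 as A does.
import Mathlib
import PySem

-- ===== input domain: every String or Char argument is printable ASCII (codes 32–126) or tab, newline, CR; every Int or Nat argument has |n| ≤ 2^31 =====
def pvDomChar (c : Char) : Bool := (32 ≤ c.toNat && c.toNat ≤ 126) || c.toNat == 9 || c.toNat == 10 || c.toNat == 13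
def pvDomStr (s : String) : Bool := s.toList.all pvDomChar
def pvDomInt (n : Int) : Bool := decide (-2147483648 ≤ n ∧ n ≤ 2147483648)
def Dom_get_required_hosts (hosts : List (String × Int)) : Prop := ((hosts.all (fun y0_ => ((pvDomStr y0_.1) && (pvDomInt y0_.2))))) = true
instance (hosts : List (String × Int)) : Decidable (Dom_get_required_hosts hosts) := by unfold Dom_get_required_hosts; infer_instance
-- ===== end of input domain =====

-- B replaces A's inner scan over the power-of-two list with a closed-form
-- bit-length computation; simpler, same result.


-- ===== PORT A =====
-- inner 'for available in available_hosts: if available > host: append; break'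
def pvFindAvail (avail : List Int) (host : Int) : List Int :=
  match avail with
  | [] => []
  | a :: rest => if a > host then [a] else pvFindAvail rest host

def get_required_hosts (hosts : List (String × Int)) : List Int :=
  hosts.foldl (fun required_hosts kv =>
    required_hosts ++ pvFindAvail [4, 8, 16, 32, 64, 128, 256, 512, 1024] kv.2) []

-- ===== PORT B =====
-- port of int.bit_length for nonnegative values (Python library call)
def pvBitLength (n : Nat) : Nat :=
  if n = 0 then 0 else pvBitLength (n / 2) + 1
decreasing_by exact Nat.div_lt_self (Nat.pos_of_ne_zero (by assumption)) (by omega)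

def get_required_hosts_alt (hosts : List (String × Int)) : List Int :=
  hosts.foldl (fun required kv =>
    if kv.2 < 1024 then
      required ++ [if kv.2 < 4 then (4 : Int) else (2 : Int) ^ pvBitLength kv.2.toNat]
    else required) []

-- ===== PRECONDITION & SPEC =====
def Spec_get_required_hosts (hosts : List (String × Int)) (out : List Int) : Prop := out = get_required_hosts_alt hosts
instance (hosts : List (String × Int)) (out : List Int) : Decidable (Spec_get_required_hosts hosts out) := by unfold Spec_get_required_hosts; infer_instance

-- ===== CLAIM (what is proved, stated in full; the proofs are below) =====
def Claim_equal_get_required_hosts : Prop := ∀ (hosts : List (String × Int)), Dom_get_required_hosts hosts → Spec_get_required_hosts hosts (get_required_hosts hosts)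

-- ===== LEMMAS AND PROOFS =====

theorem pvBitLength_eq (k n : Nat) (h1 : 2 ^ k ≤ n) (h2 : n < 2 ^ (k + 1)) :
    pvBitLength n = k + 1 := by
  induction k generalizing n with
  | zero =>
    have hn : n = 1 := by norm_num at h1 h2; omega
    subst hn; rw [pvBitLength]; norm_num; rw [pvBitLength]; norm_num
  | succ k ih =>
    have hn0 : n ≠ 0 := by
      have : 0 < 2 ^ (k + 1) := pow_pos (by norm_num) _
      omega
    rw [pvBitLength]; rw [if_neg hn0]
    have h1' : 2 ^ k ≤ n / 2 := by
      rw [Nat.le_div_iff_mul_le (by norm_num)]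
      calc 2 ^ k * 2 = 2 ^ (k + 1) := (pow_succ 2 k).symm
        _ ≤ n := h1
    have h2' : n / 2 < 2 ^ (k + 1) := by
      rw [Nat.div_lt_iff_lt_mul (by norm_num)]
      calc n < 2 ^ (k + 1 + 1) := h2
        _ = 2 ^ (k + 1) * 2 := pow_succ 2 (k + 1)
    rw [ih (n / 2) h1' h2']

theorem step_eq (h : Int) :
    pvFindAvail [4, 8, 16, 32, 64, 128, 256, 512, 1024] h =
      (if h < 1024 then
        [if h < 4 then (4 : Int) else (2 : Int) ^ pvBitLength h.toNat]
      else []) := by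
  rcases lt_or_ge h 4 with h4 | h4
  · simp only [pvFindAvail]
    rw [if_pos (by omega), if_pos (by omega), if_pos (by omega)]
  rcases lt_or_ge h 8 with hb | h8
  · have hbl : pvBitLength h.toNat = 3 := pvBitLength_eq 2 h.toNat (by norm_num; omega) (by norm_num; omega)
    simp only [pvFindAvail]
    rw [if_neg (by omega)]
    rw [if_pos (by omega), if_pos (by omega), if_neg (by omega), hbl]
    norm_num
  rcases lt_or_ge h 16 with hb | h16
  · have hbl : pvBitLength h.toNat = 4 := pvBitLength_eq 3 h.toNat (by norm_num; omega) (by norm_num; omega)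
    simp only [pvFindAvail]
    rw [if_neg (by omega)]
    rw [if_neg (by omega)]
    rw [if_pos (by omega), if_pos (by omega), if_neg (by omega), hbl]
    norm_num
  rcases lt_or_ge h 32 with hb | h32
  · have hbl : pvBitLength h.toNat = 5 := pvBitLength_eq 4 h.toNat (by norm_num; omega) (by norm_num; omega)
    simp only [pvFindAvail]
    rw [if_neg (by omega)]
    rw [if_neg (by omega)]
    rw [if_neg (by omega)]
    rw [if_pos (by omega), if_pos (by omega), if_neg (by omega), hbl]
    norm_num
  rcases lt_or_ge h 64 with hb | h64
  · have hbl : pvBitLength h.toNat = 6 := pvBitLength_eq 5 h.toNat (by norm_num; omega) (by norm_num; omega)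
    simp only [pvFindAvail]
    rw [if_neg (by omega)]
    rw [if_neg (by omega)]
    rw [if_neg (by omega)]
    rw [if_neg (by omega)]
    rw [if_pos (by omega), if_pos (by omega), if_neg (by omega), hbl]
    norm_num
  rcases lt_or_ge h 128 with hb | h128
  · have hbl : pvBitLength h.toNat = 7 := pvBitLength_eq 6 h.toNat (by norm_num; omega) (by norm_num; omega)
    simp only [pvFindAvail]
    rw [if_neg (by omega)]
    rw [if_neg (by omega)]
    rw [if_neg (by omega)]
    rw [if_neg (by omega)]
    rw [if_neg (by omega)]
    rw [if_pos (by omega), if_pos (by omega), if_neg (by omega), hbl]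
    norm_num
  rcases lt_or_ge h 256 with hb | h256
  · have hbl : pvBitLength h.toNat = 8 := pvBitLength_eq 7 h.toNat (by norm_num; omega) (by norm_num; omega)
    simp only [pvFindAvail]
    rw [if_neg (by omega)]
    rw [if_neg (by omega)]
    rw [if_neg (by omega)]
    rw [if_neg (by omega)]
    rw [if_neg (by omega)]
    rw [if_neg (by omega)]
    rw [if_pos (by omega), if_pos (by omega), if_neg (by omega), hbl]
    norm_num
  rcases lt_or_ge h 512 with hb | h512
  · have hbl : pvBitLength h.toNat = 9 := pvBitLength_eq 8 h.toNat (by norm_num; omega) (by norm_num; omega)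
    simp only [pvFindAvail]
    rw [if_neg (by omega)]
    rw [if_neg (by omega)]
    rw [if_neg (by omega)]
    rw [if_neg (by omega)]
    rw [if_neg (by omega)]
    rw [if_neg (by omega)]
    rw [if_neg (by omega)]
    rw [if_pos (by omega), if_pos (by omega), if_neg (by omega), hbl]
    norm_num
  rcases lt_or_ge h 1024 with hb | h1024
  · have hbl : pvBitLength h.toNat = 10 := pvBitLength_eq 9 h.toNat (by norm_num; omega) (by norm_num; omega)
    simp only [pvFindAvail]
    rw [if_neg (by omega)]
    rw [if_neg (by omega)]
    rw [if_neg (by omega)]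
    rw [if_neg (by omega)]
    rw [if_neg (by omega)]
    rw [if_neg (by omega)]
    rw [if_neg (by omega)]
    rw [if_neg (by omega)]
    rw [if_pos (by omega), if_pos (by omega), if_neg (by omega), hbl]
    norm_num
  simp only [pvFindAvail]
  rw [if_neg (by omega)]
  rw [if_neg (by omega)]
  rw [if_neg (by omega)]
  rw [if_neg (by omega)]
  rw [if_neg (by omega)]
  rw [if_neg (by omega)]
  rw [if_neg (by omega)]
  rw [if_neg (by omega)]
  rw [if_neg (by omega)]
  rw [if_neg (by omega)]

theorem foldl_eq (l : List (String × Int)) (acc : List Int) :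
    l.foldl (fun required_hosts kv =>
      required_hosts ++ pvFindAvail [4, 8, 16, 32, 64, 128, 256, 512, 1024] kv.2) acc =
    l.foldl (fun required kv =>
      if kv.2 < 1024 then
        required ++ [if kv.2 < 4 then (4 : Int) else (2 : Int) ^ pvBitLength kv.2.toNat]
      else required) acc := by
  induction l generalizing acc with
  | nil => rfl
  | cons kv rest ih =>
    simp only [List.foldl_cons]
    rw [step_eq kv.2]
    by_cases hc : kv.2 < 1024
    · rw [if_pos hc, if_pos hc, ih]
    · rw [if_neg hc, if_neg hc, List.append_nil, ih]

-- ===== VERDICT (by name: the statement is the Claim_ definition above) =====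
theorem get_required_hosts_spec : Claim_equal_get_required_hosts := by
  intro hosts _
  unfold Spec_get_required_hosts get_required_hosts get_required_hosts_alt
  exact foldl_eq hosts []
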